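-- pv_equiv track=rewrite | github.com/09-03/Infa | Exam/22.py | horei
-- ===== SOURCE A (Python) =====
-- def horei(udar):
--     match = 0
--     horei_syllable = []
--     for i in range(1,len(udar)+1):
--         syllable = 2*i - 1
--         horei_syllable.append(syllable)
--     for item in udar:
--         if item in horei_syllable:
--             match+=1
--     return match
-- ===== SOURCE B (Python) =====
-- def horei(udar):
--     # Iterate over the candidate odd targets directly instead of building
--     # the odds list and testing membership per item.
--     return sum(udar.count(t) for t in range(1, 2*len(udar), 2))
-- ===== Notes on version B (the rewrite author's own statement) =====
-- stated objective: simpler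
-- what changed: B drops the precomputed odds list and the per-item membership test: it iterates over the odd targets 1,3,...,2n-1 directly and sums udar.count(t), transposing the two loops into a one-line sum.
import Mathlib
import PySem

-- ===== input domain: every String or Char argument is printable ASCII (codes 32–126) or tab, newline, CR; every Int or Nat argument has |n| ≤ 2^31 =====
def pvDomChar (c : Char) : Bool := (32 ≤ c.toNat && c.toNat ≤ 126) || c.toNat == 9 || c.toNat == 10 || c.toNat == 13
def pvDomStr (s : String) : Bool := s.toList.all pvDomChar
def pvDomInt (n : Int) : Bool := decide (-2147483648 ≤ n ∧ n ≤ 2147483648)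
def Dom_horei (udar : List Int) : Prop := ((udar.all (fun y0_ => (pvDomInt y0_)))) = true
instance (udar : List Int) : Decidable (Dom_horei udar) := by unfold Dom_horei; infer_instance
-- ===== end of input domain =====

-- B iterates directly over the odd targets 1,3,…,2n-1 and sums udar.count(t),
-- instead of A's precomputed odds list and per-item membership test (objective: simpler).

-- ===== PORT A =====
def horei (udar : List Int) : Int :=
  let horei_syllable :=
    (PySem.List.pyRange 1 ((udar.length : Int) + 1) 1).foldl
      (fun acc i => acc ++ [2 * i - 1]) []
  udar.foldl (fun m item => if item ∈ horei_syllable then m + 1 else m) 0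

-- ===== PORT B =====
def horei_alt (udar : List Int) : Int :=
  ((PySem.List.pyRange 1 (2 * (udar.length : Int)) 2).map
    (fun t => (PySem.List.count udar t : Int))).sum

-- ===== PRECONDITION & SPEC =====
def Spec_horei (udar : List Int) (out : Int) : Prop := out = horei_alt udar
instance (udar : List Int) (out : Int) : Decidable (Spec_horei udar out) := by unfold Spec_horei; infer_instance

-- ===== CLAIM (what is proved, stated in full; the proofs are below) =====
def Claim_equal_horei : Prop := ∀ (udar : List Int), Dom_horei udar → Spec_horei udar (horei udar)

-- ===== LEMMAS AND PROOFS =====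

-- range(1, 2n, 2) enumerates exactly the values 2*i-1 for i in range(1, n+1)
theorem horei_range_eq (n : Nat) :
    PySem.List.pyRange 1 (2 * (n : Int)) 2 =
      (PySem.List.pyRange 1 ((n : Int) + 1) 1).map (fun i => 2 * i - 1) := by
  rw [PySem.List.pyRange_of_pos 1 (2 * (n : Int)) (by norm_num), PySem.List.pyRange_one]
  rw [List.map_map]
  have hm : (if (1 : Int) < 2 * n then (((2 * (n : Int)) - 1 + 2 - 1) / 2).toNat else 0) = n := by
    rcases Nat.eq_zero_or_pos n with h | h
    · subst h; simp
    · have h1 : (1 : Int) < 2 * n := by exact_mod_cast by omega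
      rw [if_pos h1]
      have : ((2 * (n : Int)) - 1 + 2 - 1) = 2 * n := by ring
      rw [this, Int.mul_ediv_cancel_left _ (by norm_num)]
      simp
  have hfun : (fun k : Nat => (1 : Int) + 2 * k) =
      ((fun i : Int => 2 * i - 1) ∘ fun k : Nat => 1 + k) := by
    funext k; simp; ring
  rw [hm, ← hfun]
  simp

-- summing per-target occurrence counts over a duplicate-free target list
-- equals counting the items that hit any target
theorem horei_sum_count (T : List Int) (hT : T.Nodup) (udar : List Int) :
    (T.map (fun t => (List.count t udar : Int))).sum =
      ((List.countP (fun x => decide (x ∈ T)) udar : Nat) : Int) := by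
  induction udar with
  | nil => simp
  | cons x xs ih =>
    have hcnt : (fun t : Int => (List.count t (x :: xs) : Int)) =
        fun t => (List.count t xs : Int) + (if t = x then 1 else 0) := by
      funext t
      rw [List.count_cons]
      by_cases h : t = x
      · simp [h]
      · simp only [if_neg h]
        simp
        exact fun hh => h hh.symm
    rw [hcnt, PySem.List.sum_map_add_int, ih, List.countP_cons]
    have hind : (T.map (fun t : Int => if t = x then (1 : Int) else 0)).sum =
        if x ∈ T then (1 : Int) else 0 := by
      have hmapfun : (fun t : Int => if t = x then (1 : Int) else 0) =
          fun t => if (t == x) = true then (1 : Int) else 0 := by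
        funext t; by_cases h : t = x <;> simp [h]
      rw [hmapfun, PySem.List.sum_map_ite_one_zero (fun t : Int => t == x) T]
      have hcount : List.countP (fun t : Int => t == x) T = T.count x := by
        simp [List.count_eq_countP]
      by_cases hx : x ∈ T
      · have h1 : T.count x = 1 := List.count_eq_one_of_mem hT hx
        rw [hcount, h1, if_pos hx]; norm_num
      · have h0 : T.count x = 0 := List.count_eq_zero.mpr hx
        rw [hcount, h0, if_neg hx]; norm_num
    rw [hind]
    by_cases hx : x ∈ T <;> simp [hx]

theorem horei_syllable_nodup (n : Nat) :
    ((PySem.List.pyRange 1 ((n : Int) + 1) 1).map (fun i => 2 * i - 1)).Nodup := by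
  refine (PySem.List.nodup_pyRange_one 1 ((n : Int) + 1)).map ?_
  intro a b hab
  simp only at hab
  omega

-- ===== VERDICT (by name: the statement is the Claim_ definition above) =====
theorem horei_spec : Claim_equal_horei := by
  intro udar _
  unfold Spec_horei horei horei_alt
  rw [PySem.List.foldl_append_singleton_eq_map, List.nil_append,
    PySem.List.foldl_ite_add_one
      (fun item => item ∈ (PySem.List.pyRange 1 ((udar.length : Int) + 1) 1).map (fun i => 2 * i - 1)),
    horei_range_eq udar.length]
  have := horei_sum_count
    ((PySem.List.pyRange 1 ((udar.length : Int) + 1) 1).map (fun i => 2 * i - 1))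
    (horei_syllable_nodup udar.length) udar
  simp only [PySem.List.count_eq] at *
  rw [this]
  ring
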